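-- pv_equiv track=rewrite | github.com/nickaigi/automatic-dollop | arcade_solutions/the_core/lineup.py | line_up_short
-- ===== SOURCE A (Python) =====
-- def line_up_short(cmds):
--     weird = False
--     total = 0
--     for c in cmds:
--         if c == 'L' or c == 'R':
--             weird = not weird
--         if not weird:
--             total += 1
--     return total
-- ===== SOURCE B (Python) =====
-- def line_up_short(cmds):
--     # Skip over whole segments delimited by pairs of turn commands:
--     # everything before the next turn faces forward and counts at once,
--     # everything up to and including the turn after that faces backward
--     # except the closing turn itself, which counts.
--     total = 0
--     rest = cmds
--     while True:
--         i = next((k for k, c in enumerate(rest) if c == 'L' or c == 'R'), None)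
--         if i is None:
--             return total + len(rest)
--         tail = rest[i + 1:]
--         j = next((k for k, c in enumerate(tail) if c == 'L' or c == 'R'), None)
--         if j is None:
--             return total + i
--         total += i + 1
--         rest = tail[j + 1:]
-- ===== Notes on version B (the rewrite author's own statement) =====
-- stated objective: alternative
-- what changed: B never maintains a facing flag: it repeatedly searches for the next pair of turn commands, adds the whole forward segment's length (plus the closing turn) at once, and skips the backward segment.
import Mathlib
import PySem

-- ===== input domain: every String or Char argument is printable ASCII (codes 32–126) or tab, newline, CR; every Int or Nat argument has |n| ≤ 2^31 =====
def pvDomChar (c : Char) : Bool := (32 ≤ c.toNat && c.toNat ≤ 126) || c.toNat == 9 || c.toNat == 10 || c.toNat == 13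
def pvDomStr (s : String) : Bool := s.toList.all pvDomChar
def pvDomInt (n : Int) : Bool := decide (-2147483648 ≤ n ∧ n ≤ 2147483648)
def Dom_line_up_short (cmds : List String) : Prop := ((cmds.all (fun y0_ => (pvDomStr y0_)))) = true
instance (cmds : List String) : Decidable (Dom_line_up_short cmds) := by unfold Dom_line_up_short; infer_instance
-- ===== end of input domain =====

-- B replaces A's per-command boolean toggle with a segment-skipping loop that finds pairs
-- of turn commands and adds whole forward-segment lengths at once; objective: alternative.

-- ===== PORT A =====
def line_up_short (cmds : List String) : Int :=
  (cmds.foldl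
    (fun (st : Bool × Int) c =>
      let weird := if c = "L" ∨ c = "R" then !st.1 else st.1
      (weird, if !weird then st.2 + 1 else st.2))
    (false, 0)).2

-- ===== PORT B =====
def pvIsTurn (c : String) : Bool := c == "L" || c == "R"

-- the while-loop of Source B: `total` is the accumulator, `rest` the remaining commands
def pvGo (total : Int) (rest : List String) : Int :=
  match h : rest.findIdx? pvIsTurn with
  | none => total + rest.length
  | some i =>
    let tail := rest.drop (i + 1)
    match tail.findIdx? pvIsTurn with
    | none => total + i
    | some j => pvGo (total + i + 1) (tail.drop (j + 1))
termination_by rest.length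
decreasing_by
  cases rest with
  | nil => simp [List.findIdx?, List.findIdx?.go] at h
  | cons a l => simp [List.length_drop]

def line_up_short_alt (cmds : List String) : Int := pvGo 0 cmds

-- ===== PRECONDITION & SPEC =====
def Spec_line_up_short (cmds : List String) (out : Int) : Prop := out = line_up_short_alt cmds
instance (cmds : List String) (out : Int) : Decidable (Spec_line_up_short cmds out) := by unfold Spec_line_up_short; infer_instance

-- ===== CLAIM (what is proved, stated in full; the proofs are below) =====
def Claim_equal_line_up_short : Prop := ∀ (cmds : List String), Dom_line_up_short cmds → Spec_line_up_short cmds (line_up_short cmds)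

-- ===== LEMMAS AND PROOFS =====

-- A's loop body as a named function
def pvStepA (st : Bool × Int) (c : String) : Bool × Int :=
  let weird := if c = "L" ∨ c = "R" then !st.1 else st.1
  (weird, if !weird then st.2 + 1 else st.2)

-- the value the fold takes when started in the `weird = true` state
def pvT (tot : Int) (rest : List String) : Int :=
  match rest.findIdx? pvIsTurn with
  | none => tot
  | some j => pvGo (tot + 1) (rest.drop (j + 1))

-- non-dependent unfolding of pvGo (the `h :` in its match is only for termination)
lemma pvGo_eq (tot : Int) (rest : List String) : pvGo tot rest =
    match rest.findIdx? pvIsTurn with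
    | none => tot + rest.length
    | some i =>
      match (rest.drop (i + 1)).findIdx? pvIsTurn with
      | none => tot + i
      | some j => pvGo (tot + i + 1) ((rest.drop (i + 1)).drop (j + 1)) := by
  rw [pvGo]
  split
  · next h => rw [h]
  · next i h => rw [h]

lemma pvIsTurn_iff (c : String) : pvIsTurn c = true ↔ (c = "L" ∨ c = "R") := by
  simp [pvIsTurn]

lemma pvGo_cons_not_turn (tot : Int) (c : String) (cs : List String)
    (hc : ¬ (c = "L" ∨ c = "R")) : pvGo tot (c :: cs) = pvGo (tot + 1) cs := by
  have hct : pvIsTurn c = false := by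
    rw [← Bool.not_eq_true, pvIsTurn_iff]; exact hc
  rw [pvGo_eq tot, pvGo_eq (tot + 1)]
  cases hfi : cs.findIdx? pvIsTurn with
  | none =>
      simp only [List.findIdx?_cons, hct, hfi, Option.map_none, Bool.false_eq_true,
        if_false, List.length_cons]
      push_cast; ring
  | some j =>
      simp only [List.findIdx?_cons, hct, hfi, Option.map_some, Bool.false_eq_true,
        if_false, List.drop_succ_cons]
      cases hfj : (cs.drop (j + 1)).findIdx? pvIsTurn with
      | none =>
          show tot + ((j + 1 : Nat) : Int) = tot + 1 + (j : Int)
          push_cast; ring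
      | some k =>
          show pvGo (tot + ((j + 1 : Nat) : Int) + 1) ((cs.drop (j + 1)).drop (k + 1))
            = pvGo (tot + 1 + (j : Int) + 1) ((cs.drop (j + 1)).drop (k + 1))
          congr 1
          push_cast; ring

lemma pvT_cons_not_turn (tot : Int) (c : String) (cs : List String)
    (hc : ¬ (c = "L" ∨ c = "R")) : pvT tot (c :: cs) = pvT tot cs := by
  have hct : pvIsTurn c = false := by
    rw [← Bool.not_eq_true, pvIsTurn_iff]; exact hc
  unfold pvT
  cases hfi : cs.findIdx? pvIsTurn with
  | none =>
      simp only [List.findIdx?_cons, hct, hfi, Option.map_none, Bool.false_eq_true, if_false]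
  | some j =>
      simp only [List.findIdx?_cons, hct, hfi, Option.map_some, Bool.false_eq_true,
        if_false, List.drop_succ_cons]

lemma pvGo_cons_turn (tot : Int) (c : String) (cs : List String)
    (hc : c = "L" ∨ c = "R") : pvGo tot (c :: cs) = pvT tot cs := by
  have hct : pvIsTurn c = true := (pvIsTurn_iff c).2 hc
  rw [pvGo_eq]
  unfold pvT
  cases hfi : cs.findIdx? pvIsTurn with
  | none =>
      simp only [List.findIdx?_cons, hct, hfi, if_true, List.drop_succ_cons, List.drop_zero,
        Nat.cast_zero, add_zero]
  | some j =>
      simp only [List.findIdx?_cons, hct, hfi, if_true, List.drop_succ_cons, List.drop_zero]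
      congr 1
      ring

lemma pvT_cons_turn (tot : Int) (c : String) (cs : List String)
    (hc : c = "L" ∨ c = "R") : pvT tot (c :: cs) = pvGo (tot + 1) cs := by
  have hct : pvIsTurn c = true := (pvIsTurn_iff c).2 hc
  unfold pvT
  simp only [List.findIdx?_cons, hct, if_true, List.drop_succ_cons, List.drop_zero]

-- the main invariant: A's fold from either phase equals B's loop values
lemma pvKey (cmds : List String) : ∀ (tot : Int),
    ((cmds.foldl pvStepA (false, tot)).2 = pvGo tot cmds)
    ∧ ((cmds.foldl pvStepA (true, tot)).2 = pvT tot cmds) := by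
  induction cmds with
  | nil =>
      intro tot
      constructor
      · rw [pvGo_eq]; simp [List.findIdx?_nil]
      · unfold pvT; simp [List.findIdx?_nil]
  | cons c cs ih =>
      intro tot
      by_cases hc : c = "L" ∨ c = "R"
      · constructor
        · have hstep : pvStepA (false, tot) c = (true, tot) := by
            simp [pvStepA, hc]
          rw [List.foldl_cons, hstep, (ih tot).2, pvGo_cons_turn tot c cs hc]
        · have hstep : pvStepA (true, tot) c = (false, tot + 1) := by
            simp [pvStepA, hc]
          rw [List.foldl_cons, hstep, (ih (tot + 1)).1, pvT_cons_turn tot c cs hc]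
      · constructor
        · have hstep : pvStepA (false, tot) c = (false, tot + 1) := by
            simp [pvStepA, hc]
          rw [List.foldl_cons, hstep, (ih (tot + 1)).1, pvGo_cons_not_turn tot c cs hc]
        · have hstep : pvStepA (true, tot) c = (true, tot) := by
            simp [pvStepA, hc]
          rw [List.foldl_cons, hstep, (ih tot).2, pvT_cons_not_turn tot c cs hc]

-- ===== VERDICT (by name: the statement is the Claim_ definition above) =====
theorem line_up_short_spec : Claim_equal_line_up_short := by
  intro cmds _
  show line_up_short cmds = line_up_short_alt cmds
  unfold line_up_short line_up_short_alt
  exact (pvKey cmds 0).1
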